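-- pv_equiv track=rewrite | github.com/apadrta/AoC | advent_of_code_2025/day07/solution.py | trace_beams
-- ===== SOURCE A (Python) =====
-- def trace_beams(start, data):
--     """
--     make part 1 beams tracing
--     """
--     archive = []
--     process = [start]
--     for split in data:
--         if not split:
--             continue
--         new = []
--         for ray in process:
--             if ray in split:
--                 # two new rays created + old ray to archive
--                 if ray - 1 not in new:
--                     new.append(ray - 1)
--                 if ray + 1 not in new:
--                     new.append(ray + 1)
--                 archive.append(ray)
--             else:
--                 # ray is continuous (no split)
--                 if ray not in new:
--                     new.append(ray)
--         process = new
--     return len(archive)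
-- ===== SOURCE B (Python) =====
-- def trace_beams(start, data):
--     # Merge-based simulation: the active rays are kept as a strictly increasing
--     # list; each level sorts the split positions once and uses two-pointer
--     # merges (partition + sorted unions) instead of per-ray membership scans.
--     active = [start]
--     total = 0
--     for split in data:
--         if not split:
--             continue
--         s = sorted(set(split))
--         hit, miss = _partition(active, s)
--         total += len(hit)
--         active = _union(_union(miss, [r - 1 for r in hit]), [r + 1 for r in hit])
--     return total
--
--
-- def _partition(a, s):
--     """Split sorted-unique a into (members of s, non-members) by merge scan."""
--     hit, miss = [], []
--     i = j = 0
--     while i < len(a) and j < len(s):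
--         if a[i] < s[j]:
--             miss.append(a[i])
--             i += 1
--         elif a[i] > s[j]:
--             j += 1
--         else:
--             hit.append(a[i])
--             i += 1
--             j += 1
--     miss.extend(a[i:])
--     return hit, miss
--
--
-- def _union(a, b):
--     """Merge two sorted-unique lists into their sorted-unique union."""
--     out = []
--     i = j = 0
--     while i < len(a) and j < len(b):
--         if a[i] < b[j]:
--             out.append(a[i])
--             i += 1
--         elif a[i] > b[j]:
--             out.append(b[j])
--             j += 1
--         else:
--             out.append(a[i])
--             i += 1
--             j += 1
--     out.extend(a[i:])
--     out.extend(b[j:])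
--     return out
-- ===== Notes on version B (the rewrite author's own statement) =====
-- stated objective: alternative
-- what changed: B keeps the active rays as a strictly increasing list and processes each level with two-pointer merge scans (sort the split once, merge-partition into hit/miss, sorted-union merges of the new ray positions), replacing A's per-ray loop with nested list-membership scans; it trades hash/membership lookups for sorted-order merging.
import Mathlib
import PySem

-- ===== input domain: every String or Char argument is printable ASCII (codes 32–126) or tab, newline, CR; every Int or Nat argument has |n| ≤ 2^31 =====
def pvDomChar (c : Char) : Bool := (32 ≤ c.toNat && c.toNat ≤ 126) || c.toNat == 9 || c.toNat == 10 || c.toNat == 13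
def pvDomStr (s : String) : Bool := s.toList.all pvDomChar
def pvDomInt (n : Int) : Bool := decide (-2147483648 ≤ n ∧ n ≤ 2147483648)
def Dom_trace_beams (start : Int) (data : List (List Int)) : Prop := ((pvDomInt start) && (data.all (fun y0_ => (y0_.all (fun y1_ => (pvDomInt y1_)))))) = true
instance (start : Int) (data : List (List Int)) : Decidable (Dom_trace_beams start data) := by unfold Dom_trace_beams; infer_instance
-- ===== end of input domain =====

-- B keeps the active rays as a strictly increasing list and processes each level by
-- two-pointer merge scans (sort the split, merge-partition into hit/miss, sorted-union
-- merges of the new positions) instead of A's per-ray loop with list-membership scans.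

-- ===== PORT A =====
-- one iteration of A's outer loop; state = (archive, process)
def traceStepA (split : List Int) (st : List Int × List Int) : List Int × List Int :=
  if split = [] then st
  else
    st.2.foldl (fun st2 ray =>
      if ray ∈ split then
        let new1 := if (ray - 1) ∈ st2.2 then st2.2 else st2.2 ++ [ray - 1]
        let new2 := if (ray + 1) ∈ new1 then new1 else new1 ++ [ray + 1]
        (st2.1 ++ [ray], new2)
      else
        (st2.1, if ray ∈ st2.2 then st2.2 else st2.2 ++ [ray])) (st.1, [])

def trace_beams (start : Int) (data : List (List Int)) : Int :=
  ((data.foldl (fun st split => traceStepA split st) ([], [start])).1.length : Int)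

-- ===== PORT B =====
-- Source B's `_partition` (two-pointer while loop over indices, transcribed as the
-- corresponding head-consuming recursion): splits sorted-unique a into
-- (members of s, non-members) by a merge scan
def pvPartition : List Int → List Int → List Int × List Int
  | [], _ => ([], [])
  | a, [] => ([], a)
  | x :: a, y :: s =>
    if x < y then
      let (h, m) := pvPartition a (y :: s); (h, x :: m)
    else if y < x then pvPartition (x :: a) s
    else
      let (h, m) := pvPartition a s; (x :: h, m)
termination_by a s => a.length + s.length

-- Source B's `_union` (two-pointer while loop, same transcription): sorted-unique union
def pvUnion : List Int → List Int → List Int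
  | [], b => b
  | a, [] => a
  | x :: a, y :: b =>
    if x < y then x :: pvUnion a (y :: b)
    else if y < x then y :: pvUnion (x :: a) b
    else x :: pvUnion a b
termination_by a b => a.length + b.length

-- one iteration of B's outer loop; state = (active, total)
def traceStepB (split : List Int) (st : List Int × Int) : List Int × Int :=
  if split = [] then st
  else
    let s := PySem.List.sorted (PySem.Set.ofList split) (fun x => x) false
    let (hit, miss) := pvPartition st.1 s
    (pvUnion (pvUnion miss (hit.map (fun r => r - 1))) (hit.map (fun r => r + 1)),
     st.2 + (hit.length : Int))

def trace_beams_alt (start : Int) (data : List (List Int)) : Int :=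
  (data.foldl (fun st split => traceStepB split st) ([start], 0)).2

-- ===== PRECONDITION & SPEC =====
def Spec_trace_beams (start : Int) (data : List (List Int)) (out : Int) : Prop := out = trace_beams_alt start data
instance (start : Int) (data : List (List Int)) (out : Int) : Decidable (Spec_trace_beams start data out) := by unfold Spec_trace_beams; infer_instance

-- ===== CLAIM (what is proved, stated in full; the proofs are below) =====
def Claim_equal_trace_beams : Prop := ∀ (start : Int) (data : List (List Int)), Dom_trace_beams start data → Spec_trace_beams start data (trace_beams start data)

-- ===== LEMMAS AND PROOFS =====

theorem nodup_snoc {l : List Int} {y : Int} (hl : l.Nodup) (hy : y ∉ l) : (l ++ [y]).Nodup := by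
  rw [List.nodup_append]
  exact ⟨hl, List.nodup_singleton y, by intro a ha b hb; simp at hb; exact fun e => hy ((e.trans hb) ▸ ha)⟩

theorem mem_addIf (l : List Int) (y x : Int) :
    (x ∈ (if y ∈ l then l else l ++ [y])) ↔ x ∈ l ∨ x = y := by
  split_ifs with c
  · exact ⟨Or.inl, fun h => h.elim id (fun e => e ▸ c)⟩
  · simp

-- characterization of A's inner fold: archive gains exactly the splitting rays, in order
theorem traceA_inner_archive (split : List Int) (p arch new : List Int) :
    (p.foldl (fun st2 ray =>
      if ray ∈ split then
        let new1 := if (ray - 1) ∈ st2.2 then st2.2 else st2.2 ++ [ray - 1]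
        let new2 := if (ray + 1) ∈ new1 then new1 else new1 ++ [ray + 1]
        (st2.1 ++ [ray], new2)
      else
        (st2.1, if ray ∈ st2.2 then st2.2 else st2.2 ++ [ray])) (arch, new)).1
    = arch ++ p.filter (fun ray => decide (ray ∈ split)) := by
  induction p generalizing arch new with
  | nil => simp
  | cons ray t ih =>
    by_cases h : ray ∈ split <;> simp [h, ih]

-- membership in A's inner fold result
theorem traceA_inner_mem (split : List Int) (p : List Int) (arch new : List Int) (x : Int) :
    (x ∈ (p.foldl (fun st2 ray =>
      if ray ∈ split then
        let new1 := if (ray - 1) ∈ st2.2 then st2.2 else st2.2 ++ [ray - 1]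
        let new2 := if (ray + 1) ∈ new1 then new1 else new1 ++ [ray + 1]
        (st2.1 ++ [ray], new2)
      else
        (st2.1, if ray ∈ st2.2 then st2.2 else st2.2 ++ [ray])) (arch, new)).2)
    ↔ (x ∈ new ∨ ∃ ray ∈ p, (ray ∈ split ∧ (x = ray - 1 ∨ x = ray + 1)) ∨ (ray ∉ split ∧ x = ray)) := by
  induction p generalizing arch new with
  | nil => simp
  | cons ray t ih =>
    simp only [List.foldl_cons]
    by_cases h : ray ∈ split
    · rw [if_pos h]
      rw [ih]
      rw [mem_addIf, mem_addIf]
      constructor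
      · rintro (((hx | hx) | hx) | ⟨r, hr, hc⟩)
        · exact Or.inl hx
        · exact Or.inr ⟨ray, by simp, Or.inl ⟨h, Or.inl hx⟩⟩
        · exact Or.inr ⟨ray, by simp, Or.inl ⟨h, Or.inr hx⟩⟩
        · exact Or.inr ⟨r, List.mem_cons_of_mem _ hr, hc⟩
      · rintro (hx | ⟨r, hr, hc⟩)
        · exact Or.inl (Or.inl (Or.inl hx))
        · rcases List.mem_cons.1 hr with rfl | hr'
          · rcases hc with ⟨_, hx | hx⟩ | ⟨hns, _⟩
            · exact Or.inl (Or.inl (Or.inr hx))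
            · exact Or.inl (Or.inr hx)
            · exact absurd h hns
          · exact Or.inr ⟨r, hr', hc⟩
    · rw [if_neg h]
      rw [ih]
      rw [mem_addIf]
      constructor
      · rintro ((hx | hx) | ⟨r, hr, hc⟩)
        · exact Or.inl hx
        · exact Or.inr ⟨ray, by simp, Or.inr ⟨h, hx⟩⟩
        · exact Or.inr ⟨r, List.mem_cons_of_mem _ hr, hc⟩
      · rintro (hx | ⟨r, hr, hc⟩)
        · exact Or.inl (Or.inl hx)
        · rcases List.mem_cons.1 hr with rfl | hr'
          · rcases hc with ⟨hs, _⟩ | ⟨_, hx⟩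
            · exact absurd hs h
            · exact Or.inl (Or.inr hx)
          · exact Or.inr ⟨r, hr', hc⟩

-- A's inner fold keeps the new list duplicate-free
theorem traceA_inner_nodup (split : List Int) (p : List Int) (arch new : List Int)
    (hn : new.Nodup) :
    ((p.foldl (fun st2 ray =>
      if ray ∈ split then
        let new1 := if (ray - 1) ∈ st2.2 then st2.2 else st2.2 ++ [ray - 1]
        let new2 := if (ray + 1) ∈ new1 then new1 else new1 ++ [ray + 1]
        (st2.1 ++ [ray], new2)
      else
        (st2.1, if ray ∈ st2.2 then st2.2 else st2.2 ++ [ray])) (arch, new)).2).Nodup := by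
  induction p generalizing arch new with
  | nil => simpa
  | cons ray t ih =>
    simp only [List.foldl_cons]
    by_cases h : ray ∈ split
    · rw [if_pos h]
      apply ih
      split_ifs with c1 c2 c3
      · exact hn
      · exact nodup_snoc hn c2
      · exact nodup_snoc hn c1
      · exact nodup_snoc (nodup_snoc hn c1) c3
    · rw [if_neg h]
      apply ih
      split_ifs with c
      · exact hn
      · exact nodup_snoc hn c

-- pvPartition on strictly sorted inputs is the filter partition
theorem pvPartition_eq (a s : List Int) (ha : a.Pairwise (· < ·)) (hs : s.Pairwise (· < ·)) :
    pvPartition a s = (a.filter (fun x => decide (x ∈ s)), a.filter (fun x => decide (x ∉ s))) := by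
  induction a, s using pvPartition.induct with
  | case1 s => simp [pvPartition]
  | case2 a h => cases a with
    | nil => simp at h
    | cons x a => simp [pvPartition]
  | case3 x a y s hxy h m heq ih =>
    have hx : x ∉ y :: s := by
      intro hc
      rcases List.mem_cons.1 hc with rfl | hc'
      · omega
      · have := (List.pairwise_cons.1 hs).1 _ hc'; omega
    have hxy' : ¬(x = y) := by simp at hx; tauto
    have hxs : x ∉ s := by simp at hx; tauto
    rw [pvPartition]
    simp only [if_pos hxy]
    rw [ih ha.of_cons hs]
    simp [hxy', hxs]
  | case4 x a y s hxy hyx ih =>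
    have hgt : ∀ z ∈ x :: a, y < z := by
      intro z hz
      rcases List.mem_cons.1 hz with rfl | hz'
      · omega
      · have := (List.pairwise_cons.1 ha).1 _ hz'; omega
    rw [pvPartition]
    simp only [if_neg hxy, if_pos hyx]
    rw [ih ha hs.of_cons]
    have hmem : ∀ z ∈ x :: a, (z ∈ y :: s) ↔ (z ∈ s) := by
      intro z hz
      constructor
      · intro hc
        rcases List.mem_cons.1 hc with rfl | hc'
        · exact absurd (hgt _ hz) (by omega)
        · exact hc'
      · exact List.mem_cons_of_mem _
    have h1 : (x :: a).filter (fun z => decide (z ∈ y :: s)) = (x :: a).filter (fun z => decide (z ∈ s)) := by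
      apply List.filter_congr; intro z hz; simp [hmem z hz]
    have h2 : (x :: a).filter (fun z => decide (z ∉ y :: s)) = (x :: a).filter (fun z => decide (z ∉ s)) := by
      apply List.filter_congr; intro z hz; simp [hmem z hz]
    rw [h1, h2]
  | case5 x a y s hxy hyx h m heq ih =>
    have hxeq : x = y := by omega
    subst hxeq
    have hta : ∀ z ∈ a, x < z := (List.pairwise_cons.1 ha).1
    rw [pvPartition]
    simp only [if_neg hxy]
    rw [ih ha.of_cons hs.of_cons]
    have hne : ∀ z ∈ a, ¬(z = x) := fun z hz => by have := hta z hz; omega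
    have hA : List.filter (fun z => decide (z = x) || decide (z ∈ s)) a
        = List.filter (fun z => decide (z ∈ s)) a := by
      apply List.filter_congr; intro z hz; simp [hne z hz]
    have hB : List.filter (fun z => !decide (z = x) && !decide (z ∈ s)) a
        = List.filter (fun z => !decide (z ∈ s)) a := by
      apply List.filter_congr; intro z hz; simp [hne z hz]
    simp [hA, hB]

-- membership in pvUnion (no sortedness needed)
theorem mem_pvUnion (a b : List Int) (x : Int) : x ∈ pvUnion a b ↔ x ∈ a ∨ x ∈ b := by
  induction a, b using pvUnion.induct with
  | case1 b => simp [pvUnion]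
  | case2 a h => cases a with
    | nil => simp at h
    | cons y a => simp [pvUnion]
  | case3 y a z b hyz ih =>
    rw [pvUnion]; simp only [if_pos hyz]
    simp [ih, or_assoc]
  | case4 y a z b hyz hzy ih =>
    rw [pvUnion]; simp only [if_neg hyz, if_pos hzy]
    simp only [List.mem_cons, ih]
    tauto
  | case5 y a z b hyz hzy ih =>
    have : y = z := by omega
    subst this
    rw [pvUnion]; simp only [if_neg hyz]
    simp only [List.mem_cons, ih]
    tauto

-- pvUnion of strictly sorted lists is strictly sorted
theorem pvUnion_pairwise (a b : List Int) (ha : a.Pairwise (· < ·)) (hb : b.Pairwise (· < ·)) :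
    (pvUnion a b).Pairwise (· < ·) := by
  induction a, b using pvUnion.induct with
  | case1 b => simpa [pvUnion]
  | case2 a h => cases a with
    | nil => simp at h
    | cons y a => simpa [pvUnion, List.pairwise_cons] using ha
  | case3 y a z b hyz ih =>
    rw [pvUnion]; simp only [if_pos hyz]
    rw [List.pairwise_cons]
    refine ⟨?_, ih ha.of_cons hb⟩
    intro w hw
    rcases (mem_pvUnion _ _ _).1 hw with hw' | hw'
    · exact (List.pairwise_cons.1 ha).1 _ hw'
    · rcases List.mem_cons.1 hw' with rfl | hw''
      · exact hyz
      · have := (List.pairwise_cons.1 hb).1 _ hw''; omega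
  | case4 y a z b hyz hzy ih =>
    rw [pvUnion]; simp only [if_neg hyz, if_pos hzy]
    rw [List.pairwise_cons]
    refine ⟨?_, ih ha hb.of_cons⟩
    intro w hw
    rcases (mem_pvUnion _ _ _).1 hw with hw' | hw'
    · rcases List.mem_cons.1 hw' with rfl | hw''
      · exact hzy
      · have := (List.pairwise_cons.1 ha).1 _ hw''; omega
    · exact (List.pairwise_cons.1 hb).1 _ hw'
  | case5 y a z b hyz hzy ih =>
    have : y = z := by omega
    subst this
    rw [pvUnion]; simp only [if_neg hyz]
    rw [List.pairwise_cons]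
    refine ⟨?_, ih ha.of_cons hb.of_cons⟩
    intro w hw
    rcases (mem_pvUnion _ _ _).1 hw with hw' | hw'
    · exact (List.pairwise_cons.1 ha).1 _ hw'
    · exact (List.pairwise_cons.1 hb).1 _ hw'

-- shifting a strictly sorted list stays strictly sorted
theorem map_add_pairwise (l : List Int) (c : Int) (hl : l.Pairwise (· < ·)) :
    (l.map (fun r => r + c)).Pairwise (· < ·) := by
  rw [List.pairwise_map]
  exact hl.imp (by omega)

-- two duplicate-free lists with the same members have the same length
theorem length_eq_of_nodup_of_mem_iff {l₁ l₂ : List Int} (h₁ : l₁.Nodup) (h₂ : l₂.Nodup)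
    (h : ∀ x, x ∈ l₁ ↔ x ∈ l₂) : l₁.length = l₂.length :=
  ((List.perm_ext_iff_of_nodup h₁ h₂).2 h).length_eq

-- the outer induction: A's (archive, process) and B's (active, total) stay related
theorem trace_outer (data : List (List Int)) (arch p : List Int) (a : List Int) (tot : Int)
    (hp : p.Nodup) (ha : a.Pairwise (· < ·)) (hmem : ∀ x, x ∈ p ↔ x ∈ a)
    (htot : (arch.length : Int) = tot) :
    (((data.foldl (fun st split => traceStepA split st) (arch, p)).1.length : Int))
      = (data.foldl (fun st split => traceStepB split st) (a, tot)).2 := by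
  induction data generalizing arch p a tot with
  | nil => simpa
  | cons split rest ih =>
    by_cases hs : split = []
    · simp only [List.foldl_cons, traceStepA, traceStepB, if_pos hs]
      exact ih arch p a tot hp ha hmem htot
    · simp only [List.foldl_cons, traceStepA, traceStepB, if_neg hs]
      set s := PySem.List.sorted (PySem.Set.ofList split) (fun x => x) false with hsdef
      have hssort : s.Pairwise (· < ·) := PySem.List.sorted_ofList_pairwise_lt split
      have hsm : ∀ x : Int, x ∈ s ↔ x ∈ split := by
        intro x; rw [hsdef, PySem.List.mem_sorted, PySem.Set.mem_ofList]
      rw [pvPartition_eq a s ha hssort]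
      set hit := a.filter (fun x => decide (x ∈ s)) with hhit
      set miss := a.filter (fun x => decide (x ∉ s)) with hmiss
      have hhitsort : hit.Pairwise (· < ·) := ha.sublist List.filter_sublist
      have hmisssort : miss.Pairwise (· < ·) := ha.sublist List.filter_sublist
      have hnewsort : (pvUnion (pvUnion miss (hit.map (fun r => r - 1))) (hit.map (fun r => r + 1))).Pairwise (· < ·) := by
        apply pvUnion_pairwise
        · apply pvUnion_pairwise _ _ hmisssort
          have := map_add_pairwise hit (-1) hhitsort
          simpa [sub_eq_add_neg] using this
        · exact map_add_pairwise hit 1 hhitsort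
      apply ih
      · exact traceA_inner_nodup split p arch [] (by simp)
      · exact hnewsort
      · intro x
        rw [traceA_inner_mem]
        rw [mem_pvUnion, mem_pvUnion]
        simp only [List.not_mem_nil, false_or, List.mem_map, hhit, hmiss, List.mem_filter,
          decide_eq_true_eq, hsm, hmem]
        constructor
        · rintro ⟨r, hr, ⟨hrs, hx⟩ | ⟨hrs, hx⟩⟩
          · rcases hx with hx | hx
            · exact Or.inl (Or.inr ⟨r, ⟨hr, hrs⟩, hx.symm⟩)
            · exact Or.inr ⟨r, ⟨hr, hrs⟩, hx.symm⟩
          · exact Or.inl (Or.inl ⟨hx ▸ hr, hx ▸ hrs⟩)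
        · rintro ((⟨hxa, hxs⟩ | ⟨r, ⟨hra, hrs⟩, hx⟩) | ⟨r, ⟨hra, hrs⟩, hx⟩)
          · exact ⟨x, hxa, Or.inr ⟨hxs, rfl⟩⟩
          · exact ⟨r, hra, Or.inl ⟨hrs, Or.inl hx.symm⟩⟩
          · exact ⟨r, hra, Or.inl ⟨hrs, Or.inr hx.symm⟩⟩
      · rw [traceA_inner_archive]
        have hlen : (p.filter (fun ray => decide (ray ∈ split))).length = hit.length := by
          apply length_eq_of_nodup_of_mem_iff (hp.filter _) hhitsort.nodup
          intro x
          simp [hhit, List.mem_filter, hsm, hmem]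
        simp only [List.length_append, hlen, ← htot]
        push_cast
        ring

-- ===== VERDICT (by name: the statement is the Claim_ definition above) =====
theorem trace_beams_spec : Claim_equal_trace_beams := by
  intro start data _
  show trace_beams start data = trace_beams_alt start data
  unfold trace_beams trace_beams_alt
  exact trace_outer data [] [start] [start] 0 (by simp) (by simp) (fun x => Iff.rfl) (by simp)
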